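-- pv_equiv track=rewrite | github.com/s3bw/foolscap | foolscap/meta_data/parse_note.py | get_contents
-- ===== SOURCE A (Python) =====
-- def get_contents(note):
--     """ Get note content.
--
--     Looks for '==' lines and extract only that which
--         is between them.
--
--     parse_text.pairwise in this case, pairs sets of content-indexes
--     """
--     content_index = [
--         index
--         for index, line
--         in enumerate(note)
--         if line[:2] == '=='
--     ]
--     # This should only deal with one Note, split notes then get content.
--     indexes = pairwise(content_index)
--
--     # for start, end in indexes:
--     content = [note[start:end + 1] for start, end in indexes]
--
--     return content
--
-- def pairwise(iterable):
--     """ Pairs even length iterables.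
--
--     Returns:
--         (:obj:list[tuple]) paired tuples
--
--     Example:
--         >>> pairwise([1, 2, 3, 4])
--         [(1, 2), (3, 4)]
--     """
--     # Do I throw error for odd length iterable?
--     a = iter(iterable)
--     return zip(a, a)
-- ===== SOURCE B (Python) =====
-- def get_contents(note):
--     """ Get note content: single stateful pass pairing '==' marker lines on the fly. """
--     content = []
--     start = None
--     for index, line in enumerate(note):
--         if line[:2] == '==':
--             if start is None:
--                 start = index
--             else:
--                 content.append(note[start:index + 1])
--                 start = None
--     return content
-- ===== Notes on version B (the rewrite author's own statement) =====
-- stated objective: simpler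
-- what changed: Replaces the three-stage collect-marker-indexes / zip-iterator pairwise / slice-comprehension pipeline with one stateful pass over enumerate(note) that toggles a start index and emits each inclusive slice as soon as its closing marker is seen.
import Mathlib
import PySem

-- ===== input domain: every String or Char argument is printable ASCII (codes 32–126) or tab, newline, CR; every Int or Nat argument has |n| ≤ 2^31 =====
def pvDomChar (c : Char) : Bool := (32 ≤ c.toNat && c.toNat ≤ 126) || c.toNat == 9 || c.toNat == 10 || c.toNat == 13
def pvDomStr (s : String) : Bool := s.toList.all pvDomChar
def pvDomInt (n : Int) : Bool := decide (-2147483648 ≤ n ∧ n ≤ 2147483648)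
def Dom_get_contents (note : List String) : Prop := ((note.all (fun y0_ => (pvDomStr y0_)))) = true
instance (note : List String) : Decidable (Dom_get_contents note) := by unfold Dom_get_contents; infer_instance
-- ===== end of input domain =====

-- B replaces A's collect-indexes / pairwise-zip / slice-comprehension pipeline with one
-- stateful pass that pairs markers and slices on the fly (objective: simpler decomposition).

-- ===== PORT A =====
-- line[:2] == '==' (shared marker test; exact: PySem.Chars.slice on the code points)
def pvMarker (line : String) : Bool := PySem.Chars.slice line.toList none (some 2) == ['=', '=']

-- pairwise: a = iter(xs); zip(a, a) — consecutive disjoint pairs, odd leftover dropped (exact hand port of the iterator trick)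
def pvPairwise : List Int → List (Int × Int)
  | a :: b :: rest => (a, b) :: pvPairwise rest
  | _ => []

def get_contents (note : List String) : List (List String) :=
  let content_index := (PySem.List.enumerate note).filterMap
    (fun p => if pvMarker p.2 then some p.1 else none)
  let indexes := pvPairwise content_index
  indexes.map (fun q => PySem.List.slice note (some q.1) (some (q.2 + 1)))

-- ===== PORT B =====
-- the for-loop of Source B over enumerate(note) with state (start, content)
def pvLoopB (note : List String) : List (Int × String) → Option Int → List (List String) → List (List String)
  | [], _, content => content
  | (i, line) :: rest, start, content =>
    if pvMarker line then
      match start with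
      | none => pvLoopB note rest (some i) content
      | some s => pvLoopB note rest none (content ++ [PySem.List.slice note (some s) (some (i + 1))])
    else pvLoopB note rest start content

def get_contents_alt (note : List String) : List (List String) :=
  pvLoopB note (PySem.List.enumerate note) none []

-- ===== PRECONDITION & SPEC =====
def Spec_get_contents (note : List String) (out : List (List String)) : Prop := out = get_contents_alt note
instance (note : List String) (out : List (List String)) : Decidable (Spec_get_contents note out) := by unfold Spec_get_contents; infer_instance

-- ===== CLAIM (what is proved, stated in full; the proofs are below) =====
def Claim_equal_get_contents : Prop := ∀ (note : List String), Dom_get_contents note → Spec_get_contents note (get_contents note)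

-- ===== LEMMAS AND PROOFS =====

-- B's loop, run from state (start, acc), appends exactly the slices A builds from the
-- pairwise pairing of the (pending start ++) remaining marker indices.
theorem pvLoopB_eq (note : List String) : ∀ (ps : List (Int × String)) (start : Option Int) (acc : List (List String)),
    pvLoopB note ps start acc =
      acc ++ (pvPairwise (start.toList ++ ps.filterMap (fun p => if pvMarker p.2 then some p.1 else none))).map
        (fun q => PySem.List.slice note (some q.1) (some (q.2 + 1))) := by
  intro ps
  induction ps with
  | nil => intro start acc; cases start <;> simp [pvLoopB, pvPairwise]
  | cons p rest ih =>
    intro start acc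
    obtain ⟨i, line⟩ := p
    by_cases h : pvMarker line = true
    · cases start with
      | none => simp [pvLoopB, h, ih]
      | some s => simp [pvLoopB, h, ih, pvPairwise]
    · cases start <;> simp [pvLoopB, h, ih]

-- ===== VERDICT (by name: the statement is the Claim_ definition above) =====
theorem get_contents_spec : Claim_equal_get_contents := by
  intro note _
  unfold Spec_get_contents get_contents get_contents_alt
  simp [pvLoopB_eq]
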